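-- pv_equiv track=rewrite | github.com/JourneyXuu/mitsuko-2024E | K230_Zh/K230.py | detect_move
-- ===== SOURCE A (Python) =====
-- def detect_move(current_board, previous_board):
--     """
--     检测棋子移动。
--     :param current_board: 当前棋盘状态
--     :param previous_board: 上一帧棋盘状态
--     :return: 移动的起始位置和目标位置，如果没有移动则返回 None
--     """
--     from_pos = None  # 棋子移动的起始位置
--     to_pos = None    # 棋子移动的目标位置
--
--     # 遍历棋盘
--     for y in range(len(current_board)):
--         for x in range(len(current_board[y])):
--             # 如果当前位置从非空变为空，说明棋子被移走
--             if previous_board[y][x] != " " and current_board[y][x] == " ":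
--                 from_pos = (y, x)
--             # 如果当前位置从空变为非空，说明棋子被放置
--             elif previous_board[y][x] == " " and current_board[y][x] != " ":
--                 to_pos = (y, x)
--
--     # 如果检测到移动
--     if from_pos and to_pos:
--         return from_pos, to_pos
--     else:
--         return None
-- ===== SOURCE B (Python) =====
-- def detect_move(current_board, previous_board):
--     # Two independent reverse scans with early exit; the first hit in reverse
--     # row-major order is exactly the last hit of a forward scan.
--     def last_match(pred):
--         for y in range(len(current_board) - 1, -1, -1):
--             row = current_board[y]
--             for x in range(len(row) - 1, -1, -1):
--                 if pred(previous_board[y][x], row[x]):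
--                     return (y, x)
--         return None
--
--     from_pos = last_match(lambda p, c: p != " " and c == " ")
--     to_pos = last_match(lambda p, c: p == " " and c != " ")
--     if from_pos is not None and to_pos is not None:
--         return (from_pos, to_pos)
--     return None
-- ===== Notes on version B (the rewrite author's own statement) =====
-- stated objective: alternative
-- what changed: Replaced the single forward pass that keeps last-write-wins state for both positions by two independent reverse row-major scans that early-return at the first match (= the forward scan's last match).
import Mathlib
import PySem

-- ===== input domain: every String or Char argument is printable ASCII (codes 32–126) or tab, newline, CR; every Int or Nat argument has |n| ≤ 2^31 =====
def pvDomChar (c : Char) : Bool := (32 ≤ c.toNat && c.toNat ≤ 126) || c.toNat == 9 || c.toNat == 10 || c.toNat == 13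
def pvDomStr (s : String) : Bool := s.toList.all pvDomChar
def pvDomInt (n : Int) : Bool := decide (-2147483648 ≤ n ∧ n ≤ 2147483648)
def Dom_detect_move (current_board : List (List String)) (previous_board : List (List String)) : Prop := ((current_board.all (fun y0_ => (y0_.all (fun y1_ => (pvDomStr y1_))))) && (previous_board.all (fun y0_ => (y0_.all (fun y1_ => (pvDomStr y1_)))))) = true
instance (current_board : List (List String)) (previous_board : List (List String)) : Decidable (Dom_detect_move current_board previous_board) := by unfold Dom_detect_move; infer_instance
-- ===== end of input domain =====

-- B replaces A's single forward scan holding last-write-wins state for both positions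
-- by two independent reverse row-major scans that stop at their first match (alternative decomposition, same cost).

-- ===== PORT A =====
-- single forward pass over all cells, overwriting (from_pos, to_pos) state
def detect_move (current_board : List (List String)) (previous_board : List (List String)) : Option ((Int × Int) × (Int × Int)) :=
  let st : Option (Int × Int) × Option (Int × Int) :=
    (List.range current_board.length).foldl (fun st y =>
      (List.range ((current_board.getD y []).length)).foldl (fun st x =>
        let pv := (previous_board.getD y []).getD x ""
        let cv := (current_board.getD y []).getD x ""
        if pv ≠ " " ∧ cv = " " then (some ((y : Int), (x : Int)), st.2)
        else if pv = " " ∧ cv ≠ " " then (st.1, some ((y : Int), (x : Int)))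
        else st) st) (none, none)
  match st.1, st.2 with
  | some f, some t => some (f, t)
  | _, _ => none

-- ===== PORT B =====
-- B helper: reverse row-major scan, early return at the first (y,x) whose (prev,cur) pair satisfies pred
def dmFindRev (current_board : List (List String)) (previous_board : List (List String))
    (pred : String → String → Bool) : Option (Int × Int) :=
  (List.range current_board.length).reverse.findSome? (fun y =>
    (List.range ((current_board.getD y []).length)).reverse.findSome? (fun x =>
      if pred ((previous_board.getD y []).getD x "") ((current_board.getD y []).getD x "")
      then some ((y : Int), (x : Int)) else none))

def detect_move_alt (current_board : List (List String)) (previous_board : List (List String)) : Option ((Int × Int) × (Int × Int)) :=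
  let from_pos := dmFindRev current_board previous_board (fun p c => p != " " && c == " ")
  let to_pos := dmFindRev current_board previous_board (fun p c => p == " " && c != " ")
  from_pos.bind (fun f => to_pos.map (fun t => (f, t)))

-- ===== PRECONDITION & SPEC =====
-- Pre_ excludes exactly the inputs where A raises IndexError: a cell of current_board with no
-- corresponding cell in previous_board.
def Pre_detect_move (current_board : List (List String)) (previous_board : List (List String)) : Prop :=
  current_board.length ≤ previous_board.length ∧
  ∀ pr ∈ current_board.zip previous_board, pr.1.length ≤ pr.2.length
instance (current_board : List (List String)) (previous_board : List (List String)) : Decidable (Pre_detect_move current_board previous_board) := by unfold Pre_detect_move; infer_instance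
def pvWitness_detect_move : List (List String) × List (List String) :=
  ([[" ", "P"], ["q", " "]], [["P", "P"], [" ", " "]])

def Spec_detect_move (current_board : List (List String)) (previous_board : List (List String)) (out : Option ((Int × Int) × (Int × Int))) : Prop := out = detect_move_alt current_board previous_board
instance (current_board : List (List String)) (previous_board : List (List String)) (out : Option ((Int × Int) × (Int × Int))) : Decidable (Spec_detect_move current_board previous_board out) := by unfold Spec_detect_move; infer_instance

-- ===== CLAIM (what is proved, stated in full; the proofs are below) =====
def Claim_equal_detect_move : Prop := ∀ (current_board : List (List String)) (previous_board : List (List String)), Dom_detect_move current_board previous_board → Pre_detect_move current_board previous_board → Spec_detect_move current_board previous_board (detect_move current_board previous_board)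

-- ===== LEMMAS AND PROOFS =====

-- the cells of the scan in row-major order: (prev value, cur value, position)
def dmCells (current_board : List (List String)) (previous_board : List (List String)) :
    List (String × String × (Int × Int)) :=
  (List.range current_board.length).flatMap (fun y =>
    (List.range ((current_board.getD y []).length)).map (fun x =>
      ((previous_board.getD y []).getD x "", (current_board.getD y []).getD x "", ((y : Int), (x : Int)))))

-- last-write-wins fold over a list = first match of the reversed list
theorem dm_foldl_eq_findSome? {α β : Type} (p : α → Bool) (f : α → β) :
    ∀ (l : List α) (init : Option β),
      l.foldl (fun a c => if p c then some (f c) else a) init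
        = (l.reverse.findSome? (fun c => if p c then some (f c) else none)).or init := by
  intro l
  induction l using List.reverseRecOn with
  | nil => intro init; simp [Option.or]
  | append_singleton l c ih =>
      intro init
      simp only [List.foldl_append, List.foldl_cons, List.foldl_nil, List.reverse_append,
        List.reverse_cons, List.reverse_nil, List.nil_append, List.cons_append, List.findSome?]
      by_cases h : p c = true
      · simp [h, Option.or]
      · simp [h, ih]

-- A's componentwise pair fold splits into two independent folds
theorem dm_pair_foldl_split {α β γ : Type} (g : β → α → β) (h : γ → α → γ) :
    ∀ (l : List α) (b : β) (c : γ),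
      l.foldl (fun (st : β × γ) a => (g st.1 a, h st.2 a)) (b, c)
        = (l.foldl g b, l.foldl h c) := by
  intro l
  induction l with
  | nil => intro b c; rfl
  | cons a l ih => intro b c; simp [List.foldl_cons, ih]

-- A's cell update is componentwise: left component updated by pred1, right by pred2
theorem dm_update_componentwise (previous_board current_board : List (List String)) (y x : Nat)
    (st : Option (Int × Int) × Option (Int × Int)) :
    (let pv := (previous_board.getD y []).getD x ""
     let cv := (current_board.getD y []).getD x ""
     if pv ≠ " " ∧ cv = " " then (some ((y : Int), (x : Int)), st.2)
     else if pv = " " ∧ cv ≠ " " then (st.1, some ((y : Int), (x : Int)))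
     else st)
    = ((if ((previous_board.getD y []).getD x "" != " " && (current_board.getD y []).getD x "" == " ") = true
          then some ((y : Int), (x : Int)) else st.1),
       (if ((previous_board.getD y []).getD x "" == " " && (current_board.getD y []).getD x "" != " ") = true
          then some ((y : Int), (x : Int)) else st.2)) := by
  simp only [bne_iff_ne, beq_iff_eq, Bool.and_eq_true]
  split_ifs with h1 h2 <;> first | rfl | exact absurd h2.1 h1.1

-- A's fold, flattened over dmCells and split per component
theorem dm_A_eq (current_board previous_board : List (List String)) :
    detect_move current_board previous_board
      = (match
          (dmCells current_board previous_board).foldl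
            (fun a c => if (c.1 != " " && c.2.1 == " ") then some c.2.2 else a) none,
          (dmCells current_board previous_board).foldl
            (fun a c => if (c.1 == " " && c.2.1 != " ") then some c.2.2 else a) none with
        | some f, some t => some (f, t)
        | _, _ => none) := by
  unfold detect_move
  have hsplit :
      (List.range current_board.length).foldl (fun st y =>
        (List.range ((current_board.getD y []).length)).foldl (fun st x =>
          let pv := (previous_board.getD y []).getD x ""
          let cv := (current_board.getD y []).getD x ""
          if pv ≠ " " ∧ cv = " " then (some ((y : Int), (x : Int)), st.2)
          else if pv = " " ∧ cv ≠ " " then (st.1, some ((y : Int), (x : Int)))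
          else st) st) ((none : Option (Int × Int)), (none : Option (Int × Int)))
      = ((dmCells current_board previous_board).foldl
            (fun a c => if (c.1 != " " && c.2.1 == " ") then some c.2.2 else a) none,
         (dmCells current_board previous_board).foldl
            (fun a c => if (c.1 == " " && c.2.1 != " ") then some c.2.2 else a) none) := by
    have hinner : ∀ (y : Nat) (st : Option (Int × Int) × Option (Int × Int)),
        (List.range ((current_board.getD y []).length)).foldl (fun st x =>
          let pv := (previous_board.getD y []).getD x ""
          let cv := (current_board.getD y []).getD x ""
          if pv ≠ " " ∧ cv = " " then (some ((y : Int), (x : Int)), st.2)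
          else if pv = " " ∧ cv ≠ " " then (st.1, some ((y : Int), (x : Int)))
          else st) st
        = ((List.range ((current_board.getD y []).length)).map (fun x =>
              ((previous_board.getD y []).getD x "", (current_board.getD y []).getD x "",
                ((y : Int), (x : Int))))).foldl
            (fun (st : Option (Int × Int) × Option (Int × Int)) c =>
              ((if (c.1 != " " && c.2.1 == " ") then some c.2.2 else st.1),
               (if (c.1 == " " && c.2.1 != " ") then some c.2.2 else st.2))) st := by
      intro y st
      rw [List.foldl_map]
      refine List.foldl_ext _ _ st (fun st x _ => ?_)
      exact dm_update_componentwise previous_board current_board y x st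
    calc (List.range current_board.length).foldl (fun st y =>
            (List.range ((current_board.getD y []).length)).foldl (fun st x =>
              let pv := (previous_board.getD y []).getD x ""
              let cv := (current_board.getD y []).getD x ""
              if pv ≠ " " ∧ cv = " " then (some ((y : Int), (x : Int)), st.2)
              else if pv = " " ∧ cv ≠ " " then (st.1, some ((y : Int), (x : Int)))
              else st) st) ((none : Option (Int × Int)), (none : Option (Int × Int)))
        = (List.range current_board.length).foldl (fun st y =>
            (((List.range ((current_board.getD y []).length)).map (fun x =>
              ((previous_board.getD y []).getD x "", (current_board.getD y []).getD x "",
                ((y : Int), (x : Int))))).foldl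
              (fun (st : Option (Int × Int) × Option (Int × Int)) c =>
                ((if (c.1 != " " && c.2.1 == " ") then some c.2.2 else st.1),
                 (if (c.1 == " " && c.2.1 != " ") then some c.2.2 else st.2))) st))
            ((none : Option (Int × Int)), (none : Option (Int × Int))) := by
          exact List.foldl_ext _ _ _ (fun st y _ => hinner y st)
        _ = (dmCells current_board previous_board).foldl
              (fun (st : Option (Int × Int) × Option (Int × Int)) c =>
                ((if (c.1 != " " && c.2.1 == " ") then some c.2.2 else st.1),
                 (if (c.1 == " " && c.2.1 != " ") then some c.2.2 else st.2)))
              ((none : Option (Int × Int)), (none : Option (Int × Int))) := by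
          unfold dmCells
          rw [List.foldl_flatMap]
        _ = _ := dm_pair_foldl_split
            (fun (a : Option (Int × Int)) (c : String × String × (Int × Int)) =>
              if (c.1 != " " && c.2.1 == " ") then some c.2.2 else a)
            (fun (a : Option (Int × Int)) (c : String × String × (Int × Int)) =>
              if (c.1 == " " && c.2.1 != " ") then some c.2.2 else a) _ none none
  rw [hsplit]

-- findSome? distributes over flatMap
theorem dm_findSome?_flatMap {α β γ : Type} (l : List α) (g : α → List β) (f : β → Option γ) :
    (l.flatMap g).findSome? f = l.findSome? (fun a => (g a).findSome? f) := by
  induction l with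
  | nil => rfl
  | cons a l ih =>
      rw [List.flatMap_cons, List.findSome?_append, ih]
      cases h : List.findSome? f (g a) <;> simp [h]

-- B's nested reverse findSome? = findSome? over the reversed flat cell list
theorem dm_B_eq (current_board previous_board : List (List String)) (pred : String → String → Bool) :
    dmFindRev current_board previous_board pred
      = (dmCells current_board previous_board).reverse.findSome?
          (fun c => if pred c.1 c.2.1 then some c.2.2 else none) := by
  unfold dmFindRev dmCells
  rw [List.reverse_flatMap, dm_findSome?_flatMap]
  congr 1
  funext y
  show _ = ((List.range ((current_board.getD y []).length)).map _).reverse.findSome? _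
  rw [← List.map_reverse, List.findSome?_map]
  rfl

theorem dm_combine (o1 o2 : Option (Int × Int)) :
    (match o1, o2 with
      | some f, some t => some ((f, t) : (Int × Int) × (Int × Int))
      | _, _ => none)
      = o1.bind (fun f => o2.map (fun t => (f, t))) := by
  cases o1 <;> cases o2 <;> rfl

theorem dm_or_none {β : Type} (o : Option β) : o.or none = o := by
  cases o <;> rfl

-- ===== VERDICT (by name: the statement is the Claim_ definition above) =====
theorem detect_move_spec : Claim_equal_detect_move := by
  intro current_board previous_board _ _
  unfold Spec_detect_move detect_move_alt
  rw [dm_A_eq, dm_B_eq, dm_B_eq,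
    dm_foldl_eq_findSome? (fun c : String × String × (Int × Int) => (c.1 != " " && c.2.1 == " "))
      (fun c => c.2.2) (dmCells current_board previous_board) none,
    dm_foldl_eq_findSome? (fun c : String × String × (Int × Int) => (c.1 == " " && c.2.1 != " "))
      (fun c => c.2.2) (dmCells current_board previous_board) none,
    dm_or_none, dm_or_none]
  exact dm_combine _ _
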